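-- pv_equiv track=rewrite | github.com/MadeSuryawan/backend | app/managers/password_manager.py | _parse_hash_parameters
-- ===== SOURCE A (Python) =====
-- def _parse_hash_parameters(params_str: str) -> dict[str, int | None]:
--     """Parse hash parameter string into individual values."""
--     memory_val: int | None = None
--     time_val: int | None = None
--     parallel_val: int | None = None
--
--     for param in params_str.split(","):
--         if param.startswith("m="):
--             memory_val = int(param[2:])
--         elif param.startswith("t="):
--             time_val = int(param[2:])
--         elif param.startswith("p="):
--             parallel_val = int(param[2:])
--
--     return {"memory": memory_val, "time": time_val, "parallelism": parallel_val}
-- ===== SOURCE B (Python) =====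
-- def _parse_hash_parameters(params_str: str) -> dict[str, int | None]:
--     """Parse hash parameter string into individual values."""
--     table: dict[str, str] = {}
--     for token in params_str.split(","):
--         key, sep, val = token.partition("=")
--         if sep:
--             table[key] = val
--     return {
--         "memory": int(table["m"]) if "m" in table else None,
--         "time": int(table["t"]) if "t" in table else None,
--         "parallelism": int(table["p"]) if "p" in table else None,
--     }
-- ===== Notes on version B (the rewrite author's own statement) =====
-- stated objective: simpler
-- what changed: Replaces A's three in-loop startswith branches over a running triple by a build-index-then-read decomposition: one loop partitions each comma token at its first '=' into a dict, then the three values are read back with int() on the present m/t/p keys.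
import Mathlib
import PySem

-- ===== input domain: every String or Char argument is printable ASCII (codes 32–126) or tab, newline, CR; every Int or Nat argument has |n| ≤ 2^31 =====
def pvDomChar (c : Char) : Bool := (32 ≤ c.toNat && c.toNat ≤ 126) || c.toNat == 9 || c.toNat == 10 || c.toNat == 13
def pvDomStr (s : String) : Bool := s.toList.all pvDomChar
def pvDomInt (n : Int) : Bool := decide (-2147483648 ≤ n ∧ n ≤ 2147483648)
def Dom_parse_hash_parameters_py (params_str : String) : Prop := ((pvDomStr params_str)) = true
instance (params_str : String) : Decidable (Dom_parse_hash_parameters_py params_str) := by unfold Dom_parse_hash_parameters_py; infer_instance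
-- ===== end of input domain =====

-- B replaces A's three in-loop prefix branches by a build-index-then-read decomposition
-- (one partition loop filling a dict, then three lookups); objective: simpler/idiomatic, not faster.

-- ===== PORT A =====
-- loop body of A: the three startswith branches updating (memory_val, time_val, parallel_val);
-- int(...) is PySem.Int.ofChars? (none exactly where Python raises ValueError; excluded by Pre_)
def pvAStep (st : Option Int × Option Int × Option Int) (param : List Char) :
    Option Int × Option Int × Option Int :=
  if PySem.Chars.startswith param ['m', '='] then
    (PySem.Int.ofChars? (PySem.Chars.slice param (some 2) none), st.2.1, st.2.2)
  else if PySem.Chars.startswith param ['t', '='] then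
    (st.1, PySem.Int.ofChars? (PySem.Chars.slice param (some 2) none), st.2.2)
  else if PySem.Chars.startswith param ['p', '='] then
    (st.1, st.2.1, PySem.Int.ofChars? (PySem.Chars.slice param (some 2) none))
  else st

def parse_hash_parameters_py (params_str : String) : List (String × Option Int) :=
  let st := (PySem.Chars.splitOn params_str.toList [',']).foldl pvAStep (none, none, none)
  [("memory", st.1), ("time", st.2.1), ("parallelism", st.2.2)]

-- ===== PORT B =====
-- hand port of token.partition("="), exact for the single-character separator '=':
-- returns (part before first '=', whether '=' occurs, part after it)
def pvPartitionEq (cs : List Char) : List Char × Bool × List Char :=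
  match cs with
  | [] => ([], false, [])
  | c :: rest =>
    if c = '=' then ([], true, rest)
    else
      let r := pvPartitionEq rest
      (c :: r.1, r.2.1, r.2.2)

-- loop body of B: store val under key when '=' was found
def pvBStep (d : PySem.Dict (List Char) (List Char)) (token : List Char) :
    PySem.Dict (List Char) (List Char) :=
  let r := pvPartitionEq token
  if r.2.1 then d.insert r.1 r.2.2 else d

-- "int(table[k]) if k in table else None"
def pvRead (d : PySem.Dict (List Char) (List Char)) (k : List Char) : Option Int :=
  (d.get? k).bind PySem.Int.ofChars?

def parse_hash_parameters_py_alt (params_str : String) : List (String × Option Int) :=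
  let table := (PySem.Chars.splitOn params_str.toList [',']).foldl pvBStep PySem.Dict.empty
  [("memory", pvRead table ['m']), ("time", pvRead table ['t']),
   ("parallelism", pvRead table ['p'])]

-- ===== PRECONDITION & SPEC =====
-- Pre_ excludes exactly the inputs on which Python A raises ValueError: some comma-token starts
-- with "m="/"t="/"p=" but the rest of the token is not a valid int literal.
def Pre_parse_hash_parameters_py (params_str : String) : Prop :=
  ∀ param ∈ PySem.Chars.splitOn params_str.toList [','],
    (PySem.Chars.startswith param ['m', '='] ∨ PySem.Chars.startswith param ['t', '='] ∨
      PySem.Chars.startswith param ['p', '=']) →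
    (PySem.Int.ofChars? (PySem.Chars.slice param (some 2) none)).isSome = true
instance (params_str : String) : Decidable (Pre_parse_hash_parameters_py params_str) := by
  unfold Pre_parse_hash_parameters_py; infer_instance
def pvWitness_parse_hash_parameters_py : String := "m=65536,t=3,p=4"

def Spec_parse_hash_parameters_py (params_str : String) (out : List (String × Option Int)) : Prop := out = parse_hash_parameters_py_alt params_str
instance (params_str : String) (out : List (String × Option Int)) : Decidable (Spec_parse_hash_parameters_py params_str out) := by unfold Spec_parse_hash_parameters_py; infer_instance

-- ===== CLAIM (what is proved, stated in full; the proofs are below) =====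
def Claim_equal_parse_hash_parameters_py : Prop := ∀ (params_str : String), Dom_parse_hash_parameters_py params_str → Pre_parse_hash_parameters_py params_str → Spec_parse_hash_parameters_py params_str (parse_hash_parameters_py params_str)

-- ===== LEMMAS AND PROOFS =====

-- the invariant tying A's running triple to B's running dict
def pvInv (d : PySem.Dict (List Char) (List Char)) : Option Int × Option Int × Option Int :=
  (pvRead d ['m'], pvRead d ['t'], pvRead d ['p'])

-- one token preserves the invariant (A raises nowhere or not, the stored Option values coincide)
theorem pvStep_inv (d : PySem.Dict (List Char) (List Char)) (cs : List Char) :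
    pvAStep (pvInv d) cs = pvInv (pvBStep d cs) := by
  match cs with
  | [] => simp [pvAStep, pvBStep, pvPartitionEq, PySem.Chars.startswith, List.isPrefixOf]
  | [c] =>
    by_cases hc : c = '='
    · subst hc
      simp [pvAStep, pvBStep, pvPartitionEq, PySem.Chars.startswith, List.isPrefixOf,
        pvInv, pvRead, PySem.Dict.get?_insert_of_ne]
    · simp [pvAStep, pvBStep, pvPartitionEq, PySem.Chars.startswith, List.isPrefixOf, hc]
  | c1 :: c2 :: rest =>
    by_cases h1 : c1 = '='
    · subst h1
      simp [pvAStep, pvBStep, pvPartitionEq, PySem.Chars.startswith, List.isPrefixOf,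
        pvInv, pvRead, PySem.Dict.get?_insert_of_ne]
    · by_cases h2 : c2 = '='
      · subst h2
        by_cases hm : c1 = 'm'
        · subst hm
          simp [pvAStep, pvBStep, pvPartitionEq, PySem.Chars.startswith, List.isPrefixOf,
            pvInv, pvRead, PySem.Dict.get?_insert_of_ne, PySem.Dict.get?_insert_self,
            PySem.Chars.slice_eq_listSlice, PySem.List.slice]
        · by_cases ht : c1 = 't'
          · subst ht
            simp [pvAStep, pvBStep, pvPartitionEq, PySem.Chars.startswith, List.isPrefixOf,
              pvInv, pvRead, PySem.Dict.get?_insert_of_ne, PySem.Dict.get?_insert_self,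
              PySem.Chars.slice_eq_listSlice, PySem.List.slice]
          · by_cases hp : c1 = 'p'
            · subst hp
              simp [pvAStep, pvBStep, pvPartitionEq, PySem.Chars.startswith, List.isPrefixOf,
                pvInv, pvRead, PySem.Dict.get?_insert_of_ne, PySem.Dict.get?_insert_self,
                PySem.Chars.slice_eq_listSlice, PySem.List.slice]
            · have nm : (['m'] : List Char) ≠ [c1] := by simp; exact fun h => hm h.symm
              have nt : (['t'] : List Char) ≠ [c1] := by simp; exact fun h => ht h.symm
              have np : (['p'] : List Char) ≠ [c1] := by simp; exact fun h => hp h.symm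
              simp [pvAStep, pvBStep, pvPartitionEq, PySem.Chars.startswith, List.isPrefixOf,
                pvInv, pvRead, h1, Ne.symm hm, Ne.symm ht, Ne.symm hp,
                PySem.Dict.get?_insert_of_ne _ _ nm, PySem.Dict.get?_insert_of_ne _ _ nt,
                PySem.Dict.get?_insert_of_ne _ _ np]
      · -- second char is not '=': A's branches all fail; B's key (if any) has length ≥ 2
        have hsw : ∀ (k : Char), (List.isPrefixOf [k, '='] (c1 :: c2 :: rest)) = false := by
          intro k
          simp [List.isPrefixOf]
          intro _; exact fun hh => h2 hh.symm
        simp only [pvAStep, pvBStep, pvPartitionEq, PySem.Chars.startswith, hsw,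
          if_neg h1, if_neg h2, Bool.false_eq_true, if_false]
        cases hX : (pvPartitionEq rest).2.1 <;>
          simp [pvInv, pvRead,
            PySem.Dict.get?_insert_of_ne _ _
              (by simp : (['m'] : List Char) ≠ c1 :: c2 :: (pvPartitionEq rest).1),
            PySem.Dict.get?_insert_of_ne _ _
              (by simp : (['t'] : List Char) ≠ c1 :: c2 :: (pvPartitionEq rest).1),
            PySem.Dict.get?_insert_of_ne _ _
              (by simp : (['p'] : List Char) ≠ c1 :: c2 :: (pvPartitionEq rest).1)]

-- fold version of the invariant
theorem pvFold_inv (ts : List (List Char)) (d : PySem.Dict (List Char) (List Char)) :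
    ts.foldl pvAStep (pvInv d) = pvInv (ts.foldl pvBStep d) := by
  induction ts generalizing d with
  | nil => rfl
  | cons t ts ih => simp only [List.foldl_cons, pvStep_inv, ih]

-- ===== VERDICT (by name: the statement is the Claim_ definition above) =====
theorem parse_hash_parameters_py_spec : Claim_equal_parse_hash_parameters_py := by
  intro s _ _
  unfold Spec_parse_hash_parameters_py parse_hash_parameters_py parse_hash_parameters_py_alt
  have h := pvFold_inv (PySem.Chars.splitOn s.toList [',']) PySem.Dict.empty
  have h0 : pvInv PySem.Dict.empty = (none, none, none) := by
    simp [pvInv, pvRead, PySem.Dict.get?_empty]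
  rw [h0] at h
  rw [h]
  rfl
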